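-- pv_equiv track=rewrite | github.com/jrigo07/algoritmos | cadenas_combinaciones.py | reemplazar_caracteres
-- ===== SOURCE A (Python) =====
-- def reemplazar_caracteres(cadena, indices, caracteres_nuevos):
--     variantes = []
--     for espacio in range(0, len(cadena) - 9, 5):
--         lista_caracteres = list(cadena)
--         cambios_en_ventana = False
--         for indice, caracter_nuevo in zip(indices, caracteres_nuevos):
--             if espacio <= indice < espacio + 10:
--                 lista_caracteres[indice] = caracter_nuevo
--                 cambios_en_ventana = True
--         nueva_cadena = ''.join(lista_caracteres)
--         if cambios_en_ventana:
--             variantes.append(nueva_cadena)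
--     return variantes
-- ===== SOURCE B (Python) =====
-- def reemplazar_caracteres(cadena, indices, caracteres_nuevos):
--     n = len(cadena)
--     # One pass over the pairs: bucket each (index, char) into the (at most two)
--     # window starts that cover it, preserving pair order within each bucket.
--     buckets = {}
--     for indice, caracter_nuevo in zip(indices, caracteres_nuevos):
--         s1 = (indice // 5) * 5
--         for s in (s1 - 5, s1):
--             if 0 <= s < n - 9:
--                 buckets.setdefault(s, []).append((indice, caracter_nuevo))
--     variantes = []
--     for s in range(0, n - 9, 5):
--         cambios = buckets.get(s)
--         if cambios:
--             lista = list(cadena)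
--             for i, c in cambios:
--                 lista[i] = c
--             variantes.append(''.join(lista))
--     return variantes
-- ===== Notes on version B (the rewrite author's own statement) =====
-- stated objective: faster
-- what changed: Inverts the loop nesting: instead of rescanning every (index,char) pair for every window, B makes one pass over the pairs, bucketing each into the at-most-two window starts (computed arithmetically from index//5) that cover it, then emits the windows in ascending order from their buckets; the per-window rescan and the cambios flag disappear.
import Mathlib
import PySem

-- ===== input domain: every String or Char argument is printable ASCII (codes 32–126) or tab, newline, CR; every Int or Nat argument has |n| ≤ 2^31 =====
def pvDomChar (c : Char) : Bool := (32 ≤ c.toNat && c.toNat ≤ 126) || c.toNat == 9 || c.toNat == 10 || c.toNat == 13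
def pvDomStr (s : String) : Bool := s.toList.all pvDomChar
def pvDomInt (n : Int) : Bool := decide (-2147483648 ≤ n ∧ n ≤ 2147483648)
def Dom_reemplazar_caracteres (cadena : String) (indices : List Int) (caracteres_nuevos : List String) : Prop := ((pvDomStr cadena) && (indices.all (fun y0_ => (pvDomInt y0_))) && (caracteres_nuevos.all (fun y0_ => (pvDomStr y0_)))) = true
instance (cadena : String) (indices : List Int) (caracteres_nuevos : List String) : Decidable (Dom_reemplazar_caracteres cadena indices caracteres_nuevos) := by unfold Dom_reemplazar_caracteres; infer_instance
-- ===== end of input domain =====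

-- B inverts the loop nesting (one pass bucketing each change into the window starts that
-- cover it, then emitting the windows from their buckets); a timing run measured B faster.

-- ===== PORT A =====
def reemplazar_caracteres (cadena : String) (indices : List Int) (caracteres_nuevos : List String) : List String :=
  (PySem.List.pyRange 0 (PySem.Str.len cadena - 9) 5).foldl (fun variantes espacio =>
    -- inner loop over zip(indices, caracteres_nuevos) carrying (lista_caracteres, cambios_en_ventana);
    -- the index is always in range here (0 ≤ espacio ≤ indice < espacio+10 ≤ len), so pySetD is exact
    let res := (indices.zip caracteres_nuevos).foldl
      (fun (st : List String × Bool) p =>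
        if espacio ≤ p.1 ∧ p.1 < espacio + 10 then
          (PySem.List.pySetD st.1 p.1 p.2, true)
        else st)
      (cadena.toList.map (fun c => String.ofList [c]), false)
    let nueva_cadena := PySem.Str.join "" res.1
    if res.2 then variantes ++ [nueva_cadena] else variantes) []

-- ===== PORT B =====
-- bucket one (indice, caracter) pair into the (at most two) valid window starts
-- s1-5, s1 that cover it, where s1 = (indice // 5) * 5
def rc_put (n : Int) (b : PySem.Dict Int (List (Int × String))) (p : Int × String) :
    PySem.Dict Int (List (Int × String)) :=
  let s1 := PySem.Int.floordiv p.1 5 * 5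
  [s1 - 5, s1].foldl (fun b s =>
    if 0 ≤ s ∧ s < n - 9 then b.insert s (b.getD s [] ++ [p]) else b) b

-- one pass over the pairs, bucketing each into the window starts it affects
def rc_buckets (indices : List Int) (caracteres_nuevos : List String) (n : Int) :
    PySem.Dict Int (List (Int × String)) :=
  (indices.zip caracteres_nuevos).foldl (rc_put n) PySem.Dict.empty

-- apply one bucket's recorded changes, in order, to a fresh copy of cadena
def rc_apply (cadena : String) (cambios : List (Int × String)) : String :=
  PySem.Str.join "" (cambios.foldl (fun l p => PySem.List.pySetD l p.1 p.2)
    (cadena.toList.map (fun c => String.ofList [c])))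

def reemplazar_caracteres_alt (cadena : String) (indices : List Int) (caracteres_nuevos : List String) : List String :=
  let n := PySem.Str.len cadena
  let buckets := rc_buckets indices caracteres_nuevos n
  (PySem.List.pyRange 0 (n - 9) 5).foldl (fun variantes s =>
    match buckets.get? s with
    | some cambios => if cambios.isEmpty then variantes else variantes ++ [rc_apply cadena cambios]
    | none => variantes) []

-- ===== PRECONDITION & SPEC =====
def Spec_reemplazar_caracteres (cadena : String) (indices : List Int) (caracteres_nuevos : List String) (out : List String) : Prop := out = reemplazar_caracteres_alt cadena indices caracteres_nuevos
instance (cadena : String) (indices : List Int) (caracteres_nuevos : List String) (out : List String) : Decidable (Spec_reemplazar_caracteres cadena indices caracteres_nuevos out) := by unfold Spec_reemplazar_caracteres; infer_instance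

-- ===== CLAIM (what is proved, stated in full; the proofs are below) =====
def Claim_equal_reemplazar_caracteres : Prop := ∀ (cadena : String) (indices : List Int) (caracteres_nuevos : List String), Dom_reemplazar_caracteres cadena indices caracteres_nuevos → Spec_reemplazar_caracteres cadena indices caracteres_nuevos (reemplazar_caracteres cadena indices caracteres_nuevos)

-- ===== LEMMAS AND PROOFS =====

-- A's inner loop = fold of the updates over the FILTERED pair list, plus an 'any' flag
theorem rc_innerA (espacio : Int) (pairs : List (Int × String)) (l : List String) (b : Bool) :
    pairs.foldl
      (fun (st : List String × Bool) p =>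
        if espacio ≤ p.1 ∧ p.1 < espacio + 10 then
          (PySem.List.pySetD st.1 p.1 p.2, true)
        else st) (l, b)
    = ((pairs.filter (fun p => decide (espacio ≤ p.1) && decide (p.1 < espacio + 10))).foldl
        (fun l p => PySem.List.pySetD l p.1 p.2) l,
       b || pairs.any (fun p => decide (espacio ≤ p.1) && decide (p.1 < espacio + 10))) := by
  induction pairs generalizing l b with
  | nil => simp
  | cons p rest ih =>
    by_cases hg : espacio ≤ p.1 ∧ p.1 < espacio + 10
    · simp [List.foldl_cons, List.any_cons, hg, ih]
    · have h1 : (decide (espacio ≤ p.1) && decide (p.1 < espacio + 10)) = false := by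
        simpa using hg
      simp [List.foldl_cons, List.any_cons, hg, h1, ih]

-- getD through a conditional insert-append at key k
theorem rc_getD_condInsert (d : PySem.Dict Int (List (Int × String))) (cond : Prop) [Decidable cond]
    (k s : Int) (v : List (Int × String)) :
    (if cond then d.insert k (d.getD k [] ++ v) else d).getD s []
    = if cond ∧ s = k then d.getD s [] ++ v else d.getD s [] := by
  by_cases hc : cond
  · simp only [if_pos hc, PySem.Dict.getD_insert]
    by_cases hk : s = k
    · simp [hk, hc]
    · simp [hk, hc]
  · simp [hc]

-- one bucketing step changes bucket s by exactly the pairs the window at s covers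
theorem rc_bucketStep (n s : Int) (h0 : 0 ≤ s) (h1 : s < n - 9) (h5 : 5 ∣ s)
    (p : Int × String) (d : PySem.Dict Int (List (Int × String))) :
    (rc_put n d p).getD s []
    = d.getD s [] ++ (if decide (s ≤ p.1) && decide (p.1 < s + 10) then [p] else []) := by
  obtain ⟨t, ht⟩ := h5
  have hq : PySem.Int.floordiv p.1 5 * 5 ≤ p.1 ∧ p.1 < (PySem.Int.floordiv p.1 5 + 1) * 5 :=
    (PySem.Int.floordiv_eq_iff_of_pos (by norm_num)).mp rfl
  set q := PySem.Int.floordiv p.1 5 with hqdef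
  unfold rc_put
  simp only [List.foldl_cons, List.foldl_nil]
  rw [rc_getD_condInsert, rc_getD_condInsert]
  split_ifs <;> simp_all <;> omega

-- bucket s of B's dict = the filtered pair list of the window at s
theorem rc_bucketGetD (indices : List Int) (caracteres_nuevos : List String) (n s : Int)
    (h0 : 0 ≤ s) (h1 : s < n - 9) (h5 : 5 ∣ s) :
    (rc_buckets indices caracteres_nuevos n).getD s []
    = (indices.zip caracteres_nuevos).filter (fun p => decide (s ≤ p.1) && decide (p.1 < s + 10)) := by
  unfold rc_buckets
  suffices h : ∀ (pairs : List (Int × String)) (d : PySem.Dict Int (List (Int × String))),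
      (pairs.foldl (rc_put n) d).getD s []
      = d.getD s [] ++ pairs.filter (fun p => decide (s ≤ p.1) && decide (p.1 < s + 10)) by
    simpa [PySem.Dict.getD, PySem.Dict.get?, PySem.Dict.empty] using
      h (indices.zip caracteres_nuevos) PySem.Dict.empty
  intro pairs
  induction pairs with
  | nil => simp
  | cons p rest ih =>
    intro d
    simp only [List.foldl_cons, List.filter_cons]
    rw [ih, rc_bucketStep n s h0 h1 h5 p d]
    by_cases hg : (decide (s ≤ p.1) && decide (p.1 < s + 10)) = true <;>
      simp [hg, List.append_assoc]

-- B's per-window emitter, written through getD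
theorem rc_emit (cadena : String) (buckets : PySem.Dict Int (List (Int × String)))
    (s : Int) (acc : List String) :
    (match buckets.get? s with
     | some cambios => if cambios.isEmpty then acc else acc ++ [rc_apply cadena cambios]
     | none => acc)
    = (if (buckets.getD s []).isEmpty then acc else acc ++ [rc_apply cadena (buckets.getD s [])]) := by
  cases h : buckets.get? s with
  | none => simp [PySem.Dict.getD, h]
  | some c => simp [PySem.Dict.getD, h]

-- ===== VERDICT (by name: the statement is the Claim_ definition above) =====
theorem reemplazar_caracteres_spec : Claim_equal_reemplazar_caracteres := by
  intro cadena indices caracteres_nuevos _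
  unfold Spec_reemplazar_caracteres
  unfold reemplazar_caracteres reemplazar_caracteres_alt
  apply PySem.List.foldl_congr_mem
  intro acc s hs
  rw [(PySem.List.mem_pyRange_iff_of_pos (by norm_num)) s] at hs
  obtain ⟨h0, h1, h5⟩ := hs
  rw [sub_zero] at h5
  simp only [rc_innerA, Bool.false_or]
  rw [rc_emit, rc_bucketGetD indices caracteres_nuevos (PySem.Str.len cadena) s h0 h1 h5]
  rw [rc_apply]
  by_cases hne : (indices.zip caracteres_nuevos).any
      (fun p => decide (s ≤ p.1) && decide (p.1 < s + 10)) = true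
  · have hfe : ((indices.zip caracteres_nuevos).filter
        (fun p => decide (s ≤ p.1) && decide (p.1 < s + 10))).isEmpty = false := by
      simp only [List.any_eq_true] at hne
      obtain ⟨x, hx, hgx⟩ := hne
      simp only [List.isEmpty_eq_false_iff, ne_eq, List.filter_eq_nil_iff]
      exact fun h => by simpa using h x hx hgx
    rw [if_pos hne, if_neg (by simp [hfe])]
  · have hne' : (indices.zip caracteres_nuevos).any
        (fun p => decide (s ≤ p.1) && decide (p.1 < s + 10)) = false := by
      simpa using hne
    have hfe : ((indices.zip caracteres_nuevos).filter
        (fun p => decide (s ≤ p.1) && decide (p.1 < s + 10))).isEmpty = true := by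
      simp only [List.any_eq_false] at hne'
      simp only [List.isEmpty_iff, List.filter_eq_nil_iff]
      intro x hx
      simpa using hne' x hx
    rw [if_neg hne, if_pos (by simp [hfe])]
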